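-- pv_equiv track=rewrite | github.com/gangto33/ormi3 | python/231109/coding-test.py | solution
-- ===== SOURCE A (Python) =====
-- def solution(k, tangerine):
--     answer = {}
--     size = 0
--     for i in tangerine:
--         if i in answer:
--             answer[i] += 1
--         else:
--             answer[i] = 1
--
--     cnt = sorted(dict.values(answer))
--     while True:
--         k = k - cnt.pop()
--         size += 1
--         if k <= 0:
--             return size
-- ===== SOURCE B (Python) =====
-- def solution(k, tangerine):
--     freq = {}
--     for t in tangerine:
--         freq[t] = freq.get(t, 0) + 1
--     buckets = {}
--     maxc = 0
--     for c in freq.values():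
--         buckets[c] = buckets.get(c, 0) + 1
--         if c > maxc:
--             maxc = c
--     size = 0
--     for c in range(maxc, 0, -1):
--         for _ in range(buckets.get(c, 0)):
--             k -= c
--             size += 1
--             if k <= 0:
--                 return size
--     return size
-- ===== Notes on version B (the rewrite author's own statement) =====
-- stated objective: alternative
-- what changed: Replaces the comparison sort of the frequency list and the pop-largest loop by a counting-sort-style bucket histogram of the frequencies walked from the maximum count downward (trades the sort for a bucket walk; same measured cost).
import Mathlib
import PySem

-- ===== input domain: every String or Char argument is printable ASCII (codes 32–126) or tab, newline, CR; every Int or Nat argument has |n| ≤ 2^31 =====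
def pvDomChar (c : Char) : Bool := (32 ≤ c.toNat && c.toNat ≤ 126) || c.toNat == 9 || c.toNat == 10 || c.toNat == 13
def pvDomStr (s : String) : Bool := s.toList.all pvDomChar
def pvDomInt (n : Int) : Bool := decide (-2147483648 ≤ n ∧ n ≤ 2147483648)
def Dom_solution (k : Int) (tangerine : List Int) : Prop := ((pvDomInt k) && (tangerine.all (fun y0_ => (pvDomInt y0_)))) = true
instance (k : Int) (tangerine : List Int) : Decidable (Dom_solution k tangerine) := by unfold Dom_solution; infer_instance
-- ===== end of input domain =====

-- B replaces A's sort of the frequency list + pop-largest loop by a bucket histogram of the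
-- frequencies walked from the maximum count downward (counting sort instead of comparison sort).

-- ===== PORT A =====
-- the `if i in answer: answer[i] += 1 else: answer[i] = 1` body of A's first loop
def solutionCounterStep (d : PySem.Dict Int Int) (i : Int) : PySem.Dict Int Int :=
  if d.contains i then d.insert i (d.getD i 0 + 1) else d.insert i 1

-- A's `while True: k = k - cnt.pop(); size += 1; if k <= 0: return size`
-- (pop? = none is Python's IndexError on an empty pop; those inputs are outside Pre_solution)
def solutionLoop (cnt : List Int) (k size : Int) : Int :=
  match h : PySem.List.pop? cnt with
  | none => 0
  | some (c, rest) =>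
    let k' := k - c
    let size' := size + 1
    if k' ≤ 0 then size' else solutionLoop rest k' size'
termination_by cnt.length
decreasing_by
  have := PySem.List.length_of_pop?_eq_some cnt h
  simp at this ⊢; omega

def solution (k : Int) (tangerine : List Int) : Int :=
  let answer := tangerine.foldl solutionCounterStep PySem.Dict.empty
  let cnt := PySem.List.sorted answer.values (fun v => v)
  solutionLoop cnt k 0

-- ===== PORT B =====
-- inner `for _ in range(buckets.get(c, 0)):` loop; .inl = early return, .inr = updated (k, size)
def solutionAltInner (n : Nat) (c : Int) (k size : Int) : Sum Int (Int × Int) :=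
  match n with
  | 0 => .inr (k, size)
  | n + 1 =>
    let k' := k - c
    let size' := size + 1
    if k' ≤ 0 then .inl size' else solutionAltInner n c k' size'

-- outer `for c in range(maxc, 0, -1):` loop, counting c down from maxc
def solutionAltOuter (c : Nat) (buckets : PySem.Dict Int Int) (k size : Int) : Int :=
  match c with
  | 0 => size
  | m + 1 =>
    match solutionAltInner ((buckets.getD ((m + 1 : Nat) : Int) 0).toNat) ((m + 1 : Nat) : Int) k size with
    | .inl r => r
    | .inr (k', size') => solutionAltOuter m buckets k' size'

def solution_alt (k : Int) (tangerine : List Int) : Int :=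
  let freq := tangerine.foldl (fun d t => d.insert t (d.getD t 0 + 1)) PySem.Dict.empty
  let bm := freq.values.foldl
      (fun s c => (s.1.insert c (s.1.getD c 0 + 1), if c > s.2 then c else s.2))
      ((PySem.Dict.empty : PySem.Dict Int Int), (0 : Int))
  solutionAltOuter bm.2.toNat bm.1 k 0

-- ===== PRECONDITION & SPEC =====
-- Pre_ excludes exactly the inputs where A raises IndexError: empty tangerine, or k > len(tangerine)
-- (then cnt.pop() runs out before k drops to 0).
def Pre_solution (k : Int) (tangerine : List Int) : Prop :=
  tangerine ≠ [] ∧ k ≤ (tangerine.length : Int)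
instance (k : Int) (tangerine : List Int) : Decidable (Pre_solution k tangerine) := by
  unfold Pre_solution; infer_instance

def pvWitness_solution : Int × List Int := (2, [1, 1, 2])

def Spec_solution (k : Int) (tangerine : List Int) (out : Int) : Prop := out = solution_alt k tangerine
instance (k : Int) (tangerine : List Int) (out : Int) : Decidable (Spec_solution k tangerine out) := by
  unfold Spec_solution; infer_instance

-- ===== CLAIM (what is proved, stated in full; the proofs are below) =====
def Claim_equal_solution : Prop := ∀ (k : Int) (tangerine : List Int), Dom_solution k tangerine → Pre_solution k tangerine → Spec_solution k tangerine (solution k tangerine)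

-- ===== LEMMAS AND PROOFS =====

-- the common spine: consume a descending list of group sizes front-to-back
def gSpine : List Int → Int → Int → Int
  | [], _, s => s
  | c :: rest, k, s => if k - c ≤ 0 then s + 1 else gSpine rest (k - c) (s + 1)

theorem solutionLoop_append (l : List Int) (c k s : Int) :
    solutionLoop (l ++ [c]) k s = if k - c ≤ 0 then s + 1 else solutionLoop l (k - c) (s + 1) := by
  rw [solutionLoop]
  split
  · rename_i heq
    rw [PySem.List.pop?_last] at heq
    cases heq
  · rename_i c1 rest heq
    rw [PySem.List.pop?_last] at heq
    cases heq
    rfl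

theorem solutionLoop_eq_gSpine (l : List Int) :
    ∀ k s : Int, l ≠ [] → k ≤ l.sum → solutionLoop l k s = gSpine l.reverse k s := by
  induction l using List.reverseRecOn with
  | nil => intro k s h _; exact absurd rfl h
  | append_singleton l c ih =>
    intro k s _ hk
    rw [solutionLoop_append, List.reverse_append]
    simp only [List.reverse_singleton, List.singleton_append, gSpine]
    by_cases hle : k - c ≤ 0
    · simp [hle]
    · simp only [if_neg hle]
      have hsum : k - c ≤ l.sum := by
        simp [List.sum_append] at hk; omega
      have hne : l ≠ [] := by
        intro h; subst h; simp at hsum; omega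
      exact ih (k - c) (s + 1) hne hsum

theorem solutionAltInner_eq_gSpine (n : Nat) :
    ∀ (c k s : Int) (rest : List Int),
      (match solutionAltInner n c k s with
        | .inl r => r
        | .inr p => gSpine rest p.1 p.2) = gSpine (List.replicate n c ++ rest) k s := by
  induction n with
  | zero => intro c k s rest; simp [solutionAltInner]
  | succ n ih =>
    intro c k s rest
    simp only [List.replicate_succ, List.cons_append, gSpine, solutionAltInner]
    by_cases hle : k - c ≤ 0
    · simp [hle]
    · simp only [if_neg hle]
      exact ih c (k - c) (s + 1) rest

-- the list [maxc, …, maxc, …, 1, …, 1] the bucket walk consumes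
def descList (b : PySem.Dict Int Int) : Nat → List Int
  | 0 => []
  | m + 1 => List.replicate (b.getD ((m + 1 : Nat) : Int) 0).toNat ((m + 1 : Nat) : Int) ++ descList b m

theorem solutionAltOuter_eq_gSpine (m : Nat) (b : PySem.Dict Int Int) :
    ∀ k s : Int, solutionAltOuter m b k s = gSpine (descList b m) k s := by
  induction m with
  | zero => intro k s; simp [solutionAltOuter, descList, gSpine]
  | succ m ih =>
    intro k s
    rw [solutionAltOuter, descList, ← solutionAltInner_eq_gSpine]
    cases h : solutionAltInner ((b.getD ((m + 1 : Nat) : Int) 0).toNat) ((m + 1 : Nat) : Int) k s with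
    | inl r => rfl
    | inr p => exact ih p.1 p.2

theorem count_descList (b : PySem.Dict Int Int) (m : Nat) (x : Int) :
    (descList b m).count x = if 1 ≤ x ∧ x ≤ (m : Int) then (b.getD x 0).toNat else 0 := by
  induction m with
  | zero => simp [descList]; omega
  | succ m ih =>
    rw [descList, List.count_append, ih, List.count_replicate]
    push_cast
    by_cases hx : x = (m : Int) + 1
    · subst hx
      have h2 : ¬ (1 ≤ (m : Int) + 1 ∧ (m : Int) + 1 ≤ (m : Int)) := by omega
      have h3 : 1 ≤ (m : Int) + 1 ∧ (m : Int) + 1 ≤ (m : Int) + 1 := by omega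
      simp [h2, h3]
    · have hne : (((m : Int) + 1) == x) = false := by
        simp only [beq_eq_false_iff_ne]
        exact fun h => hx h.symm
      simp only [hne, Bool.false_eq_true, if_false, zero_add]
      split_ifs with h1 h2 <;> first | rfl | omega

theorem descList_bounds_pairwise (b : PySem.Dict Int Int) (m : Nat) :
    (∀ x ∈ descList b m, 1 ≤ x ∧ x ≤ (m : Int)) ∧
      (descList b m).Pairwise (fun a c => c ≤ a) := by
  induction m with
  | zero => simp [descList]
  | succ m ih =>
    rw [descList]
    constructor
    · intro x hx
      rcases List.mem_append.mp hx with h | h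
      · rcases List.eq_of_mem_replicate h with rfl
        push_cast; omega
      · have := ih.1 x h; push_cast at *; omega
    · rw [List.pairwise_append]
      refine ⟨List.pairwise_replicate.mpr (Or.inr (le_refl _)), ih.2, ?_⟩
      · intro a ha c hc
        rcases List.eq_of_mem_replicate ha with rfl
        have := (ih.1 c hc).2
        push_cast at *; omega

-- running max: every element of l is ≤ the fold result, and the seed only grows
theorem foldMax_spec (l : List Int) :
    ∀ a : Int, a ≤ l.foldl (fun mc c => if c > mc then c else mc) a ∧
      ∀ v ∈ l, v ≤ l.foldl (fun mc c => if c > mc then c else mc) a := by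
  induction l with
  | nil => intro a; simp
  | cons x t ih =>
    intro a
    have h := ih (if x > a then x else a)
    constructor
    · calc a ≤ (if x > a then x else a) := by split <;> omega
        _ ≤ _ := h.1
    · intro v hv
      rcases List.mem_cons.mp hv with rfl | hv
      · calc v ≤ (if v > a then v else a) := by split <;> omega
          _ ≤ _ := h.1
      · exact h.2 v hv

-- A's counter loop body equals the plain insert-getD+1 body
theorem counterStep_eq :
    solutionCounterStep = fun (d : PySem.Dict Int Int) i => d.insert i (d.getD i 0 + 1) := by
  funext d i
  unfold solutionCounterStep
  by_cases h : d.contains i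
  · simp [h]
  · rw [if_neg (by simp [h]), PySem.Dict.getD_of_not_contains d 0 (by simpa using h)]
    norm_num

theorem values_counter (xs : List Int) :
    (PySem.Dict.counter xs).values = (PySem.Set.ofList xs : List Int).map (fun v => (xs.count v : Int)) := by
  show (PySem.Dict.counter xs).items.map Prod.snd = _
  rw [PySem.Dict.items_counter, List.map_map]
  rfl

theorem sum_values_counter (xs : List Int) :
    (PySem.Dict.counter xs).values.sum = (xs.length : Int) := by
  rw [values_counter]
  have hperm : (PySem.Set.ofList xs : List Int).Perm xs.dedup := by
    rw [List.perm_ext_iff_of_nodup (PySem.Set.nodup_ofList xs) xs.nodup_dedup]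
    intro a; rw [PySem.Set.mem_ofList, List.mem_dedup]
  have : ((PySem.Set.ofList xs : List Int).map (fun v => (xs.count v : Int))).sum
      = ((xs.dedup).map (fun v => (xs.count v : Int))).sum := (hperm.map _).sum_eq
  rw [this]
  have := List.sum_map_count_dedup_eq_length xs
  have hcast : ((xs.dedup).map (fun v => (xs.count v : Int))).sum
      = (((xs.dedup).map (fun v => xs.count v)).sum : Int) := by
    rw [Nat.cast_list_sum, List.map_map]; rfl
  rw [hcast, this]

theorem values_counter_pos (xs : List Int) :
    ∀ v ∈ (PySem.Dict.counter xs).values, 1 ≤ v := by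
  rw [values_counter]
  intro v hv
  rcases List.mem_map.mp hv with ⟨a, ha, rfl⟩
  have : a ∈ xs := (PySem.Set.mem_ofList xs a).mp ha
  have := List.count_pos_iff.mpr this
  omega

theorem values_counter_ne_nil (xs : List Int) (h : xs ≠ []) :
    (PySem.Dict.counter xs).values ≠ [] := by
  rw [values_counter]
  cases xs with
  | nil => exact absurd rfl h
  | cons x t =>
    intro hmap
    have hx : x ∈ PySem.Set.ofList (x :: t) := (PySem.Set.mem_ofList _ x).mpr (List.mem_cons_self)
    rw [List.map_eq_nil_iff.mp hmap] at hx
    exact absurd hx (List.not_mem_nil)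

-- ===== VERDICT (by name: the statement is the Claim_ definition above) =====
theorem solution_spec : Claim_equal_solution := by
  intro k tangerine _ hpre
  unfold Pre_solution at hpre
  unfold Spec_solution
  simp only [solution, solution_alt, counterStep_eq,
    PySem.Dict.foldl_insert_getD_add_one_eq_counter]
  set vals := (PySem.Dict.counter tangerine).values with hvals
  set maxc := vals.foldl (fun mc c => if c > mc then c else mc) 0 with hmaxc
  set b := PySem.Dict.counter vals with hb
  -- facts about vals and maxc
  have hvne : vals ≠ [] := values_counter_ne_nil tangerine hpre.1
  have hvpos : ∀ v ∈ vals, 1 ≤ v := values_counter_pos tangerine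
  have hvsum : vals.sum = (tangerine.length : Int) := sum_values_counter tangerine
  have hmax0 : 0 ≤ maxc := (foldMax_spec vals 0).1
  have hmaxle : ∀ v ∈ vals, v ≤ maxc := (foldMax_spec vals 0).2
  have hmaxcast : ((maxc.toNat : Nat) : Int) = maxc := Int.toNat_of_nonneg hmax0
  -- descList b maxc.toNat is a permutation of vals
  have hcount : ∀ x : Int, (descList b maxc.toNat).count x = vals.count x := by
    intro x
    rw [count_descList]
    by_cases hr : 1 ≤ x ∧ x ≤ ((maxc.toNat : Nat) : Int)
    · rw [if_pos hr, hb, PySem.Dict.getD_counter]; simp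
    · rw [if_neg hr]
      by_cases hx : x ∈ vals
      · exact absurd ⟨hvpos x hx, by rw [hmaxcast]; exact hmaxle x hx⟩ hr
      · simp [List.count_eq_zero.mpr hx]
  have hperm : (descList b maxc.toNat).Perm vals := List.perm_iff_count.mpr hcount
  -- the sorted list is the reverse of descList
  set cnt := PySem.List.sorted vals (fun v => v) with hcnt
  have hsortedcnt : cnt.Pairwise (fun a c => a ≤ c) := PySem.List.sorted_pairwise vals (fun v => v)
  have hdp := descList_bounds_pairwise b maxc.toNat
  have hsortedrev : (descList b maxc.toNat).reverse.Pairwise (fun a c => a ≤ c) := by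
    rw [List.pairwise_reverse]; exact hdp.2
  have hpermcnt : cnt.Perm (descList b maxc.toNat).reverse :=
    ((PySem.List.sorted_perm vals (fun v => v) false).trans hperm.symm).trans
      (descList b maxc.toNat).reverse_perm.symm
  have hceq : cnt = (descList b maxc.toNat).reverse :=
    List.Perm.eq_of_pairwise (fun a c _ _ h1 h2 => le_antisymm h1 h2) hsortedcnt hsortedrev hpermcnt
  -- assemble
  have hcntne : cnt ≠ [] := by
    rw [hcnt, Ne, PySem.List.sorted_eq_nil_iff]; exact hvne
  have hksum : k ≤ cnt.sum := by
    rw [(PySem.List.sorted_perm vals (fun v => v) false).sum_eq, hvsum]; exact hpre.2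
  have hsplit : List.foldl (fun s c => (s.1.insert c (s.1.getD c 0 + 1), if c > s.2 then c else s.2))
      ((PySem.Dict.empty : PySem.Dict Int Int), (0 : Int)) vals
      = (PySem.Dict.counter vals, vals.foldl (fun mc c => if c > mc then c else mc) 0) := by
    have h := PySem.List.foldl_prod_mk
      (fun (d : PySem.Dict Int Int) (c : Int) => d.insert c (d.getD c 0 + 1))
      (fun (mc : Int) (c : Int) => if c > mc then c else mc) vals PySem.Dict.empty 0
    simpa [PySem.Dict.foldl_insert_getD_add_one_eq_counter] using h
  rw [solutionLoop_eq_gSpine cnt k 0 hcntne hksum, solutionAltOuter_eq_gSpine, hceq,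
    List.reverse_reverse, hsplit]
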